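-- pv_equiv track=rewrite | github.com/blakethom8/cool-mint | app/workflows/monthly_activity_summary_nodes/data_structure_node.py | _group_activities_by_specialty
-- ===== SOURCE A (Python) =====
-- from typing import Dict, List, Any, Optional
-- from collections import defaultdict
--
-- def _group_activities_by_specialty(
--     activities: List[Dict[str, Any]]
-- ) -> Dict[str, List[Dict[str, Any]]]:
--     """Group activities by provider specialty."""
--     specialty_groups = defaultdict(list)
--
--     for activity in activities:
--         specialty = activity.get("specialty") or "Unknown"
--         specialty_groups[specialty].append(
--             {
--                 "activity_date": activity.get("activity_date"),
--                 "contact_name": activity.get("contact_name"),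
--                 "contact_title": activity.get("contact_title"),
--                 "contact_organization": activity.get("contact_account_name"),
--                 "subject": activity.get("subject"),
--                 "description": activity.get("description"),
--                 "priority": activity.get("priority"),
--                 "status": activity.get("status"),
--                 "activity_type": activity.get("activity_type"),
--                 "mno_type": activity.get("mno_type"),
--                 "geography": activity.get("geography"),
--             }
--         )
--
--     # Sort activities within each specialty by date (most recent first)
--     for specialty in specialty_groups:
--         specialty_groups[specialty].sort(
--             key=lambda x: x.get("activity_date", ""), reverse=True
--         )
--
--     return dict(specialty_groups)
-- ===== SOURCE B (Python) =====
-- def _group_activities_by_specialty(activities):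
--     """Group activities by provider specialty via partition-recursion over a worklist:
--     peel off the first activity's specialty group, project+sort it, continue with the rest."""
--
--     FIELDS = [
--         ("activity_date", "activity_date"),
--         ("contact_name", "contact_name"),
--         ("contact_title", "contact_title"),
--         ("contact_organization", "contact_account_name"),
--         ("subject", "subject"),
--         ("description", "description"),
--         ("priority", "priority"),
--         ("status", "status"),
--         ("activity_type", "activity_type"),
--         ("mno_type", "mno_type"),
--         ("geography", "geography"),
--     ]
--
--     def spec(a):
--         return a.get("specialty") or "Unknown"
--
--     result = {}
--     rest = list(activities)
--     while rest:
--         head, tail = rest[0], rest[1:]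
--         s = spec(head)
--         group = [head] + [a for a in tail if spec(a) == s]
--         rest = [a for a in tail if spec(a) != s]
--         rows = [{out: a.get(src) for out, src in FIELDS} for a in group]
--         rows.sort(key=lambda x: x.get("activity_date", ""), reverse=True)
--         result[s] = rows
--     return result
-- ===== Notes on version B (the rewrite author's own statement) =====
-- stated objective: alternative
-- what changed: B replaces A's defaultdict accumulation plus per-key in-place sorts by a partition-recursion worklist: it repeatedly peels off the entire specialty group of the first remaining activity, projects and date-sorts that group immediately, and continues on the activities left over, so no dict accumulator or second pass over keys exists.
import Mathlib
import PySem

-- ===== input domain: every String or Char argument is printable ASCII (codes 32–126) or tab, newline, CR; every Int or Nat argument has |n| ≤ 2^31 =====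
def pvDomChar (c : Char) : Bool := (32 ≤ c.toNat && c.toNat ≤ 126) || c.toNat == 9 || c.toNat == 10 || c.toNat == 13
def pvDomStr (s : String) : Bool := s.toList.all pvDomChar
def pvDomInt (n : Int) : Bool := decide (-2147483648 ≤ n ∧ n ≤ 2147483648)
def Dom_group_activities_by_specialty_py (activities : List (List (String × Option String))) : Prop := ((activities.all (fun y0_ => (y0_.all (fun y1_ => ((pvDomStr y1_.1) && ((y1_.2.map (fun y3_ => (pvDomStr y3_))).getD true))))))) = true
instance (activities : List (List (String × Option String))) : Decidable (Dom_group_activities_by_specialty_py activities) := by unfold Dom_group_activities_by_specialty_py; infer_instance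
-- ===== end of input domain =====

-- B replaces A's defaultdict accumulation + second pass of in-place sorts by a partition-recursion
-- worklist: peel off the whole specialty group of the first remaining activity, project and
-- date-sort it at once, recurse on what is left. Objective: alternative (no speed claim).

-- ===== PORT A =====
-- A-side helpers: Python `activity.get(k)` on an input dict (missing key -> None)
def pvGetA (a : List (String × Option String)) (k : String) : Option String :=
  (a.find? (fun p => p.1 == k)).bind (·.2)

-- `activity.get("specialty") or "Unknown"` (None and "" are falsy)
def pvSpec (a : List (String × Option String)) : String :=
  match pvGetA a "specialty" with
  | some s => if s = "" then "Unknown" else s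
  | none => "Unknown"

-- the projected 11-field dict A appends for each activity
def pvProj (a : List (String × Option String)) : List (String × Option String) :=
  [("activity_date", pvGetA a "activity_date"),
   ("contact_name", pvGetA a "contact_name"),
   ("contact_title", pvGetA a "contact_title"),
   ("contact_organization", pvGetA a "contact_account_name"),
   ("subject", pvGetA a "subject"),
   ("description", pvGetA a "description"),
   ("priority", pvGetA a "priority"),
   ("status", pvGetA a "status"),
   ("activity_type", pvGetA a "activity_type"),
   ("mno_type", pvGetA a "mno_type"),
   ("geography", pvGetA a "geography")]

-- sort key `x.get("activity_date", "")` on a projected dict: the key is always present; its value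
-- may be None, on which Python's comparison raises — Pre_ excludes exactly those inputs, so the
-- `.getD ""` below is exact on every admitted input (comparisons only happen in groups of size ≥ 2,
-- where Pre_ forces every date to be a string).
def pvDateKey (x : List (String × Option String)) : String :=
  (pvGetA x "activity_date").getD ""

def group_activities_by_specialty_py (activities : List (List (String × Option String))) : List (String × List (List (String × Option String))) :=
  -- defaultdict(list) accumulation loop, then in-place sort of each group and
  -- dict(specialty_groups) in insertion order
  (activities.foldl (fun d a => d.modify (pvSpec a) [] (· ++ [pvProj a]))
      PySem.Dict.empty).items.map
    (fun p => (p.1, PySem.List.sorted p.2 pvDateKey true))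

-- ===== PORT B =====
-- B-side helpers (B's own shapes: recursive lookup, table-driven projection)
-- `a.get(k)` as direct structural recursion over the association list
def bGet : List (String × Option String) → String → Option String
  | [], _ => none
  | (k, v) :: rest, q => if k == q then v else bGet rest q

-- Source B's FIELDS table: (output key, source key)
def bFields : List (String × String) :=
  [("activity_date", "activity_date"),
   ("contact_name", "contact_name"),
   ("contact_title", "contact_title"),
   ("contact_organization", "contact_account_name"),
   ("subject", "subject"),
   ("description", "description"),
   ("priority", "priority"),
   ("status", "status"),
   ("activity_type", "activity_type"),
   ("mno_type", "mno_type"),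
   ("geography", "geography")]

-- Source B's spec(a): `a.get("specialty") or "Unknown"`
def bSpec (a : List (String × Option String)) : String :=
  let s := (bGet a "specialty").getD ""
  if s = "" then "Unknown" else s

-- `{out: a.get(src) for out, src in FIELDS}`
def bProj (a : List (String × Option String)) : List (String × Option String) :=
  bFields.map (fun f => (f.1, bGet a f.2))

-- `x.get("activity_date", "")` (key always present in a projected row; see pvDateKey's comment)
def bDateKey (x : List (String × Option String)) : String :=
  (bGet x "activity_date").getD ""

-- the while-loop over the shrinking worklist `rest`: peel off the first activity's whole
-- specialty group, project + date-sort it, continue with the activities of other specialties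
def bBuild : List (List (String × Option String)) → List (String × List (List (String × Option String)))
  | [] => []
  | head :: tail =>
    let s := bSpec head
    let group := head :: tail.filter (fun a => bSpec a == s)
    (s, PySem.List.sorted (group.map bProj) bDateKey true) ::
      bBuild (tail.filter (fun a => !(bSpec a == s)))
termination_by l => l.length
decreasing_by
  simp only [List.length_unattach, List.length_cons]
  exact Nat.lt_succ_of_le (le_trans (List.length_filter_le _ _) (by simp))

def group_activities_by_specialty_py_alt (activities : List (List (String × Option String))) : List (String × List (List (String × Option String))) :=
  bBuild activities

-- ===== PRECONDITION & SPEC =====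
-- Pre_ excludes exactly the inputs where A (and B alike) raises TypeError: some specialty group of
-- size ≥ 2 contains an activity whose "activity_date" is None, so the date sort compares None.
def Pre_group_activities_by_specialty_py (activities : List (List (String × Option String))) : Prop :=
  ∀ a ∈ activities, pvGetA a "activity_date" = none →
    activities.countP (fun b => pvSpec b == pvSpec a) ≤ 1
instance (activities : List (List (String × Option String))) : Decidable (Pre_group_activities_by_specialty_py activities) := by unfold Pre_group_activities_by_specialty_py; infer_instance

def pvWitness_group_activities_by_specialty_py : (List (List (String × Option String))) :=
  [[("specialty", some "Cardiology"), ("activity_date", some "2024-01-02")],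
   [("specialty", some "Cardiology"), ("activity_date", some "2024-03-01")],
   [("activity_date", none)]]

def Spec_group_activities_by_specialty_py (activities : List (List (String × Option String))) (out : List (String × List (List (String × Option String)))) : Prop := out = group_activities_by_specialty_py_alt activities
instance (activities : List (List (String × Option String))) (out : List (String × List (List (String × Option String)))) : Decidable (Spec_group_activities_by_specialty_py activities out) := by unfold Spec_group_activities_by_specialty_py; infer_instance

-- ===== CLAIM (what is proved, stated in full; the proofs are below) =====
def Claim_equal_group_activities_by_specialty_py : Prop := ∀ (activities : List (List (String × Option String))), Dom_group_activities_by_specialty_py activities → Pre_group_activities_by_specialty_py activities → Spec_group_activities_by_specialty_py activities (group_activities_by_specialty_py activities)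

-- ===== LEMMAS AND PROOFS =====

-- B's helpers compute A's helpers
theorem bGet_eq (a : List (String × Option String)) (k : String) : bGet a k = pvGetA a k := by
  induction a with
  | nil => simp [bGet, pvGetA]
  | cons p rest ih =>
    obtain ⟨pk, pv⟩ := p
    by_cases h : pk == k <;> [simp [bGet, pvGetA, h]; (simp [bGet, pvGetA, h]; simpa [pvGetA] using ih)]

theorem bSpec_eq : bSpec = pvSpec := by
  funext a
  simp only [bSpec, pvSpec, bGet_eq]
  cases pvGetA a "specialty" with
  | none => simp
  | some s => by_cases h : s = "" <;> simp [h, Option.getD]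

theorem bProj_eq : bProj = pvProj := by
  funext a
  simp [bProj, bFields, pvProj, bGet_eq]

theorem bDateKey_eq : bDateKey = pvDateKey := by
  funext x
  simp [bDateKey, pvDateKey, bGet_eq]

-- first-occurrence dedup commutes with filter
theorem ofList_filter {α : Type} [BEq α] [LawfulBEq α] (p : α → Bool) (ys : List α) :
    PySem.Set.ofList (ys.filter p) = (PySem.Set.ofList ys).filter p := by
  induction ys with
  | nil => simp [PySem.Set.ofList_nil]
  | cons y t ih =>
    rw [PySem.Set.ofList_cons]
    simp only [PySem.Set.discard]
    by_cases hy : p y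
    · rw [show (y :: t).filter p = y :: t.filter p by simp [hy],
          PySem.Set.ofList_cons]
      simp only [PySem.Set.discard, ih]
      rw [List.filter_cons_of_pos hy, List.filter_filter, List.filter_filter]
      congr 1
      exact List.filter_congr fun x _ => Bool.and_comm _ _
    · rw [show (y :: t).filter p = t.filter p by simp [hy],
          List.filter_cons_of_neg hy, ih, List.filter_filter]
      refine List.filter_congr ?_
      intro x _
      by_cases hp : p x
      · have : x ≠ y := fun h => hy (h ▸ hp)
        simp [hp, this]
      · simp [hp]

-- the worklist recursion, characterised over the deduplicated specialty keys
theorem bBuild_eq_aux (n : Nat) :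
    ∀ (l : List (List (String × Option String))), l.length ≤ n →
    bBuild l = (PySem.Set.ofList (l.map bSpec)).map
      (fun s => (s, PySem.List.sorted ((l.filter (fun a => bSpec a == s)).map bProj)
                      bDateKey true)) := by
  induction n with
  | zero =>
    intro l h
    have : l = [] := List.eq_nil_of_length_eq_zero (Nat.le_zero.mp h)
    subst this
    simp [bBuild, PySem.Set.ofList_nil]
  | succ n ih =>
    intro l h
    match l with
    | [] => simp [bBuild, PySem.Set.ofList_nil]
    | head :: tail =>
      rw [bBuild.eq_2]
      have hlen : (tail.filter (fun a => !(bSpec a == bSpec head))).length ≤ n :=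
        le_trans (List.length_filter_le _ _) (by simpa using Nat.succ_le_succ_iff.mp h)
      rw [ih _ hlen,
          show ((head :: tail).map bSpec) = bSpec head :: tail.map bSpec from rfl,
          PySem.Set.ofList_cons, List.map_cons]
      simp only [PySem.Set.discard]
      congr 1
      · -- the head group: bSpec head's own filter keeps head first
        simp
      · -- the remaining groups: same keys, same members
        have hmap : (tail.filter (fun a => !(bSpec a == bSpec head))).map bSpec
            = (tail.map bSpec).filter (fun x => !(x == bSpec head)) := by
          rw [List.filter_map]; rfl
        rw [hmap, ofList_filter]
        refine List.map_congr_left ?_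
        intro s' hs'
        have hne : ¬ (s' == bSpec head) = true := by
          have := (List.mem_filter.mp hs').2; simpa using this
        have hne' : s' ≠ bSpec head := by simpa using hne
        congr 1
        rw [List.filter_cons_of_neg (by simpa using fun h => hne' h.symm),
            List.filter_filter]
        refine congrArg (fun ys => PySem.List.sorted (List.map bProj ys) bDateKey true) ?_
        refine (List.filter_congr ?_).symm
        intro a _
        by_cases hA : bSpec a == s'
        · have : bSpec a ≠ bSpec head := by
            have : bSpec a = s' := by simpa using hA
            simpa [this] using hne'
          simp [hA, this]
        · simp [hA]

-- the accumulated dict of A, as an explicit items list over the deduplicated keys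
theorem pv_items_eq (activities : List (List (String × Option String))) :
    (activities.foldl (fun d a => d.modify (pvSpec a) [] (· ++ [pvProj a]))
      PySem.Dict.empty).items
    = (PySem.Set.ofList (activities.map pvSpec)).map
        (fun s => (s, (activities.filter (fun a => pvSpec a == s)).map pvProj)) := by
  have hnd : (activities.foldl
      (fun d a => d.modify (pvSpec a) [] (· ++ [pvProj a])) PySem.Dict.empty).keys.Nodup :=
    PySem.Dict.nodup_keys_foldl_modify_key activities pvSpec []
      (fun _ a v => v ++ [pvProj a]) PySem.Dict.empty (by simp [PySem.Dict.empty])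
  rw [PySem.Dict.items_eq_map_keys _ hnd [],
      PySem.Dict.keys_foldl_modify_key activities pvSpec []
        (fun _ a v => v ++ [pvProj a]) PySem.Dict.empty]
  have hupd : PySem.Set.update (PySem.Dict.empty (κ := String)
      (ν := List (List (String × Option String)))).keys (activities.map pvSpec)
      = PySem.Set.ofList (activities.map pvSpec) := rfl
  rw [hupd]
  refine List.map_congr_left (fun s _hs => ?_)
  have hfold : activities.foldl
        (fun d a => d.modify (pvSpec a) [] (· ++ [pvProj a])) PySem.Dict.empty
      = (activities.map (fun a => (pvSpec a, pvProj a))).foldl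
        (fun d p => d.modify p.1 [] (· ++ [p.2])) PySem.Dict.empty := by
    rw [List.foldl_map]
  rw [hfold, PySem.Dict.getD_foldl_modify_append, List.filter_map, List.map_map]
  simp [Function.comp_def, PySem.Dict.getD, PySem.Dict.get?, PySem.Dict.empty]

-- ===== VERDICT (by name: the statement is the Claim_ definition above) =====
theorem group_activities_by_specialty_py_spec : Claim_equal_group_activities_by_specialty_py := by
  intro activities _hdom _hpre
  unfold Spec_group_activities_by_specialty_py
  unfold group_activities_by_specialty_py group_activities_by_specialty_py_alt
  rw [pv_items_eq, List.map_map, bBuild_eq_aux activities.length activities le_rfl,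
      bSpec_eq, bProj_eq, bDateKey_eq]
  simp only [Function.comp_def]
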